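-- pv_equiv track=rewrite | github.com/marcos-venicius/aoc | 2024/13/main.py | calc
-- ===== SOURCE A (Python) =====
-- def click(x, y, t):
--     return x * t, y * t
--
-- def calc(bx: int, by: int, ax: int, ay: int, x: int, y: int):
--     cost = None
--
--     for i in range(101):
--         for j in range(101):
--             ar = click(ax, ay, i)
--             br = click(bx, by, j)
--
--             if ar[0] + br[0] == x and ar[1] + br[1] == y:
--                 if cost is None:
--                     cost = i * 3 + j
--                 else:
--                     cost = min(cost, i * 3 + j)
--
--     return cost
-- ===== SOURCE B (Python) =====
-- def _min_j(bx, by, dx, dy):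
--     # minimal j in [0,100] with bx*j == dx and by*j == dy, or None
--     if bx != 0:
--         q, r = divmod(dx, bx)
--         if r == 0 and 0 <= q <= 100 and by * q == dy:
--             return q
--         return None
--     if by != 0:
--         q, r = divmod(dy, by)
--         if r == 0 and 0 <= q <= 100 and dx == 0:
--             return q
--         return None
--     return 0 if dx == 0 and dy == 0 else None
--
-- def calc(bx: int, by: int, ax: int, ay: int, x: int, y: int):
--     best = None
--     for i in range(101):
--         j = _min_j(bx, by, x - ax * i, y - ay * i)
--         if j is not None:
--             c = i * 3 + j
--             if best is None or c < best:
--                 best = c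
--     return best
-- ===== Notes on version B (the rewrite author's own statement) =====
-- stated objective: faster
-- what changed: Replaces the inner 101-iteration scan over j by directly solving bx*j = x-ax*i (and the degenerate bx=0 cases) with one exact division per i, keeping a single loop over i.
import Mathlib
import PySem

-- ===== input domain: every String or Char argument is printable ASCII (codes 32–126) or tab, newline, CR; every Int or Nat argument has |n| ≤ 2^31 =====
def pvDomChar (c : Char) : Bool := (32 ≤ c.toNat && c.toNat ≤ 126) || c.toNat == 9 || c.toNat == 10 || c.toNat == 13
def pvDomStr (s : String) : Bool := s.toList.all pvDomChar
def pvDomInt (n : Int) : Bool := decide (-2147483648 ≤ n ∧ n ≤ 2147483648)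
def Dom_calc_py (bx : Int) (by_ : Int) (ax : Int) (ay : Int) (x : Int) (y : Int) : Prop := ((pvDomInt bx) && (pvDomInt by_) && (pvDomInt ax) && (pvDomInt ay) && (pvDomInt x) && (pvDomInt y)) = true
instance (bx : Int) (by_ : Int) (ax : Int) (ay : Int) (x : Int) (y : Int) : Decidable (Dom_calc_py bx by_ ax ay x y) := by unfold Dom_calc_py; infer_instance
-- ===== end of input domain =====

-- B replaces A's inner 101-iteration scan over j by directly solving bx*j = x-ax*i
-- (with the bx = 0 degenerate cases) with one exact division per i — one loop instead of two.

-- ===== PORT A =====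
-- helper click(x, y, t) = (x*t, y*t)
def pyClick (x : Int) (y : Int) (t : Int) : Int × Int := (x * t, y * t)

-- the 'if cost is None: cost = c  else: cost = min(cost, c)' block
def pyMinUpd (cost : Option Int) (c : Int) : Option Int :=
  match cost with
  | none => some c
  | some c0 => some (min c0 c)

def calc_py (bx : Int) (by_ : Int) (ax : Int) (ay : Int) (x : Int) (y : Int) : Option Int :=
  (PySem.List.pyRange 0 101 1).foldl (fun cost i =>
    (PySem.List.pyRange 0 101 1).foldl (fun cost j =>
      let ar := pyClick ax ay i
      let br := pyClick bx by_ j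
      if ar.1 + br.1 = x ∧ ar.2 + br.2 = y then pyMinUpd cost (i * 3 + j) else cost)
      cost) none

-- ===== PORT B =====
-- _min_j: minimal j in [0,100] with bx*j == dx and by*j == dy, or none
def pyMinJ (bx : Int) (by_ : Int) (dx : Int) (dy : Int) : Option Int :=
  if bx ≠ 0 then
    let q := PySem.Int.floordiv dx bx
    let r := PySem.Int.mod dx bx
    if r = 0 ∧ 0 ≤ q ∧ q ≤ 100 ∧ by_ * q = dy then some q else none
  else if by_ ≠ 0 then
    let q := PySem.Int.floordiv dy by_
    let r := PySem.Int.mod dy by_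
    if r = 0 ∧ 0 ≤ q ∧ q ≤ 100 ∧ dx = 0 then some q else none
  else if dx = 0 ∧ dy = 0 then some 0 else none

def calc_py_alt (bx : Int) (by_ : Int) (ax : Int) (ay : Int) (x : Int) (y : Int) : Option Int :=
  (PySem.List.pyRange 0 101 1).foldl (fun best i =>
    match pyMinJ bx by_ (x - ax * i) (y - ay * i) with
    | none => best
    | some j =>
      let c := i * 3 + j
      match best with
      | none => some c
      | some b => if c < b then some c else some b) none

-- ===== PRECONDITION & SPEC =====
def Spec_calc_py (bx : Int) (by_ : Int) (ax : Int) (ay : Int) (x : Int) (y : Int) (out : Option Int) : Prop := out = calc_py_alt bx by_ ax ay x y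
instance (bx : Int) (by_ : Int) (ax : Int) (ay : Int) (x : Int) (y : Int) (out : Option Int) : Decidable (Spec_calc_py bx by_ ax ay x y out) := by unfold Spec_calc_py; infer_instance

-- ===== CLAIM (what is proved, stated in full; the proofs are below) =====
def Claim_equal_calc_py : Prop := ∀ (bx : Int) (by_ : Int) (ax : Int) (ay : Int) (x : Int) (y : Int), Dom_calc_py bx by_ ax ay x y → Spec_calc_py bx by_ ax ay x y (calc_py bx by_ ax ay x y)

-- ===== LEMMAS AND PROOFS =====

-- if the condition holds nowhere on L, the inner fold leaves cost unchanged
theorem foldl_upd_none {p : Int → Prop} [DecidablePred p] {f : Int → Int} :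
    ∀ (L : List Int) (cost : Option Int), (∀ j ∈ L, ¬ p j) →
    L.foldl (fun c j => if p j then pyMinUpd c (f j) else c) cost = cost := by
  intro L
  induction L with
  | nil => intro cost _; rfl
  | cons h t ih =>
    intro cost hall
    simp only [List.foldl_cons]
    rw [if_neg (hall h (by simp))]
    exact ih cost (fun j hj => hall j (by simp [hj]))

-- if the condition holds exactly at j0 ∈ L (L nodup), the fold is one min-update
theorem foldl_upd_unique {p : Int → Prop} [DecidablePred p] {f : Int → Int}
    (j0 : Int) (hp : p j0) (hu : ∀ j, p j → j = j0) :
    ∀ (L : List Int), L.Nodup → j0 ∈ L → ∀ cost,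
    L.foldl (fun c j => if p j then pyMinUpd c (f j) else c) cost = pyMinUpd cost (f j0) := by
  intro L
  induction L with
  | nil => intro _ hmem; simp at hmem
  | cons h t ih =>
    intro hnd hmem cost
    simp only [List.foldl_cons]
    by_cases hph : p h
    · have hh : h = j0 := hu h hph
      subst hh
      rw [if_pos hp]
      apply foldl_upd_none
      intro j hj hpj
      have : j = h := hu j hpj
      subst this
      exact (List.nodup_cons.mp hnd).1 hj
    · rw [if_neg hph]
      have hj0t : j0 ∈ t := by
        rcases List.mem_cons.mp hmem with h1 | h1
        · exact absurd (h1 ▸ hp) hph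
        · exact h1
      exact ih (List.nodup_cons.mp hnd).2 hj0t cost

-- an already-minimal accumulator absorbs every further (guarded) min-update
theorem foldl_upd_absorb {p : Int → Prop} [DecidablePred p] {f : Int → Int} :
    ∀ (L : List Int) (m : Int), (∀ j ∈ L, m ≤ f j) →
    L.foldl (fun c j => if p j then pyMinUpd c (f j) else c) (some m) = some m := by
  intro L
  induction L with
  | nil => intro m _; rfl
  | cons h t ih =>
    intro m hall
    simp only [List.foldl_cons]
    have hstep : (if p h then pyMinUpd (some m) (f h) else some m) = some m := by
      by_cases hph : p h
      · rw [if_pos hph]; simp only [pyMinUpd]; rw [min_eq_left (hall h (by simp))]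
      · rw [if_neg hph]
    rw [hstep]
    exact ih m (fun j hj => hall j (by simp [hj]))

def f₀ (i j : Int) : Int := i * 3 + j

-- when the condition is true for every j (the bx = by = 0, dx = dy = 0 case),
-- the fold over 0..100 is a single update with j = 0
theorem foldl_upd_all {p : Int → Prop} [DecidablePred p] (i : Int)
    (hall : ∀ j : Int, p j) :
    ∀ cost, (PySem.List.pyRange 0 101 1).foldl
      (fun c j => if p j then pyMinUpd c (f₀ i j) else c) cost = pyMinUpd cost (f₀ i 0) := by
  intro cost
  rw [PySem.List.pyRange_one_cons (by norm_num)]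
  simp only [List.foldl_cons, if_pos (hall 0)]
  have hle : ∀ j ∈ PySem.List.pyRange 1 101 1, f₀ i 0 ≤ f₀ i j := by
    intro j hj
    have := (PySem.List.mem_pyRange_one.mp hj).1
    simp only [f₀]; omega
  have h01 : (0:Int) + 1 = 1 := by norm_num
  rw [h01]
  cases cost with
  | none =>
    show (PySem.List.pyRange 1 101 1).foldl _ (some (f₀ i 0)) = some (f₀ i 0)
    exact foldl_upd_absorb _ _ hle
  | some c0 =>
    show (PySem.List.pyRange 1 101 1).foldl _ (some (min c0 (f₀ i 0))) = some (min c0 (f₀ i 0))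
    exact foldl_upd_absorb _ _ (fun j hj => le_trans (min_le_right _ _) (hle j hj))

-- characterization of the inner j-loop of A as one solve (B's pyMinJ) plus one min-update
theorem inner_eq (bx by_ ax ay x y i : Int) (cost : Option Int) :
    (PySem.List.pyRange 0 101 1).foldl (fun cost j =>
      let ar := pyClick ax ay i
      let br := pyClick bx by_ j
      if ar.1 + br.1 = x ∧ ar.2 + br.2 = y then pyMinUpd cost (i * 3 + j) else cost) cost
    = match pyMinJ bx by_ (x - ax * i) (y - ay * i) with
      | none => cost
      | some j => pyMinUpd cost (i * 3 + j) := by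
  set dx := x - ax * i with hdx
  set dy := y - ay * i with hdy
  have hcond : ∀ j : Int, (ax * i + bx * j = x ∧ ay * i + by_ * j = y) ↔ (bx * j = dx ∧ by_ * j = dy) := by
    intro j; constructor <;> intro h <;> constructor <;> omega
  by_cases hbx : bx ≠ 0
  · -- unique candidate q = dx // bx
    set q := PySem.Int.floordiv dx bx with hq
    set r := PySem.Int.mod dx bx with hr
    have hqr : q * bx + r = dx := PySem.Int.floordiv_mul_add_mod dx bx
    by_cases hok : r = 0 ∧ 0 ≤ q ∧ q ≤ 100 ∧ by_ * q = dy
    · have hMJ : pyMinJ bx by_ dx dy = some q := by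
        simp only [pyMinJ, if_pos hbx]
        rw [if_pos hok]
      rw [hMJ]
      have hpq : ax * i + bx * q = x ∧ ay * i + by_ * q = y := by
        rw [hcond]; exact ⟨by nlinarith [hok.1, hqr], hok.2.2.2⟩
      have hu : ∀ j : Int, (ax * i + bx * j = x ∧ ay * i + by_ * j = y) → j = q := by
        intro j hj
        have h1 : bx * j = dx := ((hcond j).mp hj).1
        have h2 : bx * q = dx := by nlinarith [hok.1, hqr]
        exact mul_left_cancel₀ hbx (h1.trans h2.symm)
      exact foldl_upd_unique q hpq hu _ (PySem.List.nodup_pyRange_one 0 101)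
        (PySem.List.mem_pyRange_one.mpr ⟨hok.2.1, by omega⟩) cost
    · have hMJ : pyMinJ bx by_ dx dy = none := by
        simp only [pyMinJ, if_pos hbx]
        rw [if_neg hok]
      rw [hMJ]
      apply foldl_upd_none
      intro j hjmem hpj
      have h1 : bx * j = dx := ((hcond j).mp hpj).1
      have h2 : by_ * j = dy := ((hcond j).mp hpj).2
      have hjm := PySem.List.mem_pyRange_one.mp hjmem
      have hdvd : bx ∣ dx := ⟨j, h1.symm⟩
      have hr0 : r = 0 := by rw [hr]; exact (PySem.Int.mod_eq_zero_iff_dvd dx bx).mpr hdvd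
      have hqj : q = j := by
        have h3 : q * bx = j * bx := by nlinarith [hqr]
        exact mul_right_cancel₀ hbx h3
      exact hok ⟨hr0, by omega, by omega, by rw [hqj]; exact h2⟩
  · rw [not_not] at hbx
    subst hbx
    by_cases hby : by_ ≠ 0
    · set q := PySem.Int.floordiv dy by_ with hq
      set r := PySem.Int.mod dy by_ with hr
      have hqr : q * by_ + r = dy := PySem.Int.floordiv_mul_add_mod dy by_
      by_cases hok : r = 0 ∧ 0 ≤ q ∧ q ≤ 100 ∧ dx = 0
      · have hMJ : pyMinJ 0 by_ dx dy = some q := by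
          simp only [pyMinJ]
          rw [if_neg (by simp), if_pos hby, if_pos hok]
        rw [hMJ]
        have hpq : ax * i + 0 * q = x ∧ ay * i + by_ * q = y := by
          rw [hcond]; exact ⟨by nlinarith [hok.2.2.2], by nlinarith [hok.1, hqr]⟩
        have hu : ∀ j : Int, (ax * i + 0 * j = x ∧ ay * i + by_ * j = y) → j = q := by
          intro j hj
          have h1 : by_ * j = dy := ((hcond j).mp hj).2
          have h2 : by_ * q = dy := by nlinarith [hok.1, hqr]
          exact mul_left_cancel₀ hby (h1.trans h2.symm)
        exact foldl_upd_unique q hpq hu _ (PySem.List.nodup_pyRange_one 0 101)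
          (PySem.List.mem_pyRange_one.mpr ⟨hok.2.1, by omega⟩) cost
      · have hMJ : pyMinJ 0 by_ dx dy = none := by
          simp only [pyMinJ]
          rw [if_neg (by simp), if_pos hby, if_neg hok]
        rw [hMJ]
        apply foldl_upd_none
        intro j hjmem hpj
        have h1 : (0:Int) * j = dx := ((hcond j).mp hpj).1
        have h2 : by_ * j = dy := ((hcond j).mp hpj).2
        have hjm := PySem.List.mem_pyRange_one.mp hjmem
        have hdvd : by_ ∣ dy := ⟨j, h2.symm⟩
        have hr0 : r = 0 := by rw [hr]; exact (PySem.Int.mod_eq_zero_iff_dvd dy by_).mpr hdvd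
        have hqj : q = j := by
          have h3 : q * by_ = j * by_ := by nlinarith [hqr]
          exact mul_right_cancel₀ hby h3
        exact hok ⟨hr0, by omega, by omega, by omega⟩
    · rw [not_not] at hby
      subst hby
      by_cases hz : dx = 0 ∧ dy = 0
      · have hMJ : pyMinJ 0 0 dx dy = some 0 := by
          simp only [pyMinJ]
          rw [if_neg (by simp), if_neg (by simp), if_pos hz]
        rw [hMJ]
        have hall : ∀ j : Int, ax * i + 0 * j = x ∧ ay * i + 0 * j = y := by
          intro j; rw [hcond]; constructor <;> simp [hz.1, hz.2]
        exact foldl_upd_all i hall cost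
      · have hMJ : pyMinJ 0 0 dx dy = none := by
          simp only [pyMinJ]
          rw [if_neg (by simp), if_neg (by simp), if_neg hz]
        rw [hMJ]
        apply foldl_upd_none
        intro j _ hpj
        have h1 : (0:Int) * j = dx := ((hcond j).mp hpj).1
        have h2 : (0:Int) * j = dy := ((hcond j).mp hpj).2
        exact hz ⟨by omega, by omega⟩

-- B's explicit comparison is exactly the min-update
theorem bstep_eq (best : Option Int) (c : Int) :
    (match best with
     | none => some c
     | some b => if c < b then some c else some b) = pyMinUpd best c := by
  cases best with
  | none => rfl
  | some b =>
    simp only [pyMinUpd]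
    by_cases h : c < b
    · rw [if_pos h, min_eq_right (le_of_lt h)]
    · rw [if_neg h, min_eq_left (by omega)]

-- ===== VERDICT (by name: the statement is the Claim_ definition above) =====
theorem calc_py_spec : Claim_equal_calc_py := by
  unfold Claim_equal_calc_py
  intro bx by_ ax ay x y _
  unfold Spec_calc_py calc_py calc_py_alt
  apply PySem.List.foldl_congr_mem
  intro cost i _
  rw [inner_eq]
  cases pyMinJ bx by_ (x - ax * i) (y - ay * i) with
  | none => rfl
  | some j => dsimp only; exact (bstep_eq cost (i * 3 + j)).symm
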